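-- pv_equiv track=rewrite | github.com/natalietnguyen/Recursion-Familiarity | recursion2.py | groupSumClump
-- ===== SOURCE A (Python) =====
-- def groupSumClump(start, nums, target):
--   # tests if function is at the end index
--   if (start >= len(nums)):
--     # returns boolean
--     return (target == 0)
--   else:
--     # creates variable indicating number of adjacent identical numbers
--     identical_count = 0
--
--     # iterates through the indexes
--     for i in range(start, len(nums) - 1):
--       # tests if two adjacent numbers are identical
--       if nums[i] == nums[i + 1]:
--         # increases count
--         identical_count += 1
--       else:
--         # exits loop
--         break
--
--     # tests if there are any adjacent identical numbers
--     if identical_count > 0: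
--       # function calls itself: increases index by number of adjacent identical numbers and either subtracts or
--       # does not subtract all numbers from target
--       return (groupSumClump(start + (identical_count + 1), nums, target - (nums[start] * (identical_count + 1)))) \
--          or (groupSumClump(start + (identical_count + 1), nums, target))
--     else:
--       # function calls itself; increases index and either subtracts or does not subtract the current number from target
--       return (groupSumClump(start + 1, nums, target - nums[start])) or (groupSumClump(start + 1, nums, target))
-- ===== SOURCE B (Python) =====
-- def groupSumClump(start, nums, target):
--     n = len(nums)
--     if start >= n:
--         return target == 0
--     # materialize the elements A visits (same index sequence, incl. Python negative indexing)
--     seq = [nums[i] for i in range(start, n)]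
--     # collapse each maximal run of identical adjacent values into one group sum
--     groups = []
--     rest = seq
--     while rest:
--         v = rest[0]
--         k = 1
--         while k < len(rest) and rest[k] == v:
--             k += 1
--         groups.append(v * k)
--         rest = rest[k:]
--     # subset-sum DP: set of sums reachable by choosing some groups
--     reachable = {0}
--     for g in groups:
--         reachable |= {s + g for s in reachable}
--     return target in reachable
-- ===== Notes on version B (the rewrite author's own statement) =====
-- stated objective: alternative
-- what changed: Replaces A's exponential include/exclude recursion by materializing the visited elements, collapsing adjacent-identical runs into group sums in one pass, and a subset-sum DP over the set of reachable sums (no gain when the reachable sums are all distinct).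
import Mathlib
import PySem

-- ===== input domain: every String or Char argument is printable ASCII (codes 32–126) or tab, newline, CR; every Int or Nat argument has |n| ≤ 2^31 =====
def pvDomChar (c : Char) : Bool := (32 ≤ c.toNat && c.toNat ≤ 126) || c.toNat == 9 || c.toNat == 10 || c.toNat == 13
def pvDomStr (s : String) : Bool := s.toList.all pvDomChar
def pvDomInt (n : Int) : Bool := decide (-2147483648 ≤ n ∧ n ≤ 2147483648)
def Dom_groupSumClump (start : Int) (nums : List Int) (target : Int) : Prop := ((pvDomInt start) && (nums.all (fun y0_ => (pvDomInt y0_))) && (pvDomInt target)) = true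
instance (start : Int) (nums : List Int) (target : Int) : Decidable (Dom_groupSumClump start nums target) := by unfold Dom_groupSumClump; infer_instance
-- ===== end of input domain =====

-- B replaces A's include/exclude recursion by clump collapsing plus a
-- reachable-sums subset-sum DP (alternative algorithm; equal return values).

-- ===== PORT A =====
-- A's inner for-loop with break, counting adjacent identical elements from index i up to stop-1.
def pvCount (nums : List Int) (i : Int) (stop : Int) : Nat :=
  if i < stop then
    if PySem.List.pyGetD nums i 0 = PySem.List.pyGetD nums (i + 1) 0 then
      pvCount nums (i + 1) stop + 1
    else 0
  else 0
termination_by (stop - i).toNat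
decreasing_by omega

def groupSumClump (start : Int) (nums : List Int) (target : Int) : Bool :=
  if (nums.length : Int) ≤ start then target == 0
  else
    let ic : Nat := pvCount nums start ((nums.length : Int) - 1)
    if ic > 0 then
      groupSumClump (start + ((ic : Int) + 1)) nums
          (target - PySem.List.pyGetD nums start 0 * ((ic : Int) + 1)) ||
      groupSumClump (start + ((ic : Int) + 1)) nums target
    else
      groupSumClump (start + 1) nums (target - PySem.List.pyGetD nums start 0) ||
      groupSumClump (start + 1) nums target
termination_by ((nums.length : Int) - start).toNat
decreasing_by all_goals omega

-- ===== PORT B =====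
-- length of the inner while-run: how many leading elements of rest[1:] equal v
def pvRunLen (v : Int) : List Int → Nat
  | [] => 0
  | x :: xs => if x = v then pvRunLen v xs + 1 else 0

-- the outer while-loop: collapse each maximal run of identical values into one group sum
def pvClumps : List Int → List Int
  | [] => []
  | v :: xs =>
    let k := pvRunLen v xs
    v * ((k : Int) + 1) :: pvClumps (xs.drop k)
termination_by l => l.length
decreasing_by simp

def groupSumClump_alt (start : Int) (nums : List Int) (target : Int) : Bool :=
  if (nums.length : Int) ≤ start then target == 0
  else
    let seq := (PySem.List.pyRange start nums.length 1).map (fun i => PySem.List.pyGetD nums i 0)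
    let groups := pvClumps seq
    let reachable := groups.foldl
      (fun r g => PySem.Set.union r (r.map (fun s => s + g))) (PySem.Set.ofList [0])
    PySem.Set.contains reachable target

-- ===== PRECONDITION & SPEC =====
-- Pre_ excludes exactly the inputs where A raises IndexError (start below -len(nums)); B raises there too.
def Pre_groupSumClump (start : Int) (nums : List Int) (target : Int) : Prop :=
  -(nums.length : Int) ≤ start
instance (start : Int) (nums : List Int) (target : Int) : Decidable (Pre_groupSumClump start nums target) := by unfold Pre_groupSumClump; infer_instance
def pvWitness_groupSumClump : Int × List Int × Int := (0, [2, 2, 4], 8)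

def Spec_groupSumClump (start : Int) (nums : List Int) (target : Int) (out : Bool) : Prop := out = groupSumClump_alt start nums target
instance (start : Int) (nums : List Int) (target : Int) (out : Bool) : Decidable (Spec_groupSumClump start nums target out) := by unfold Spec_groupSumClump; infer_instance

-- ===== CLAIM (what is proved, stated in full; the proofs are below) =====
def Claim_equal_groupSumClump : Prop := ∀ (start : Int) (nums : List Int) (target : Int), Dom_groupSumClump start nums target → Pre_groupSumClump start nums target → Spec_groupSumClump start nums target (groupSumClump start nums target)

-- ===== LEMMAS AND PROOFS =====

-- reference function: include-or-exclude reachability over the list of group sums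
def reachB : List Int → Int → Bool
  | [], t => t == 0
  | g :: gs, t => reachB gs (t - g) || reachB gs t

-- the element sequence A visits from index `start`
def seqFrom (nums : List Int) (start : Int) : List Int :=
  (PySem.List.pyRange start nums.length 1).map (fun i => PySem.List.pyGetD nums i 0)

theorem seqFrom_nil (nums : List Int) (start : Int) (h : (nums.length : Int) ≤ start) :
    seqFrom nums start = [] := by
  simp [seqFrom, PySem.List.pyRange_one_eq_nil h]

theorem seqFrom_cons (nums : List Int) (start : Int) (h : start < (nums.length : Int)) :
    seqFrom nums start = PySem.List.pyGetD nums start 0 :: seqFrom nums (start + 1) := by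
  simp [seqFrom, PySem.List.pyRange_one_cons h]

theorem seqFrom_drop (nums : List Int) (k : Nat) :
    ∀ start : Int, (seqFrom nums start).drop k = seqFrom nums (start + k) := by
  induction k with
  | zero => simp
  | succ k ih =>
    intro start
    by_cases h : (nums.length : Int) ≤ start
    · rw [seqFrom_nil nums start h, seqFrom_nil nums _ (by push_cast; omega)]
      simp
    · rw [seqFrom_cons nums start (by omega)]
      have := ih (start + 1)
      simp only [List.drop_succ_cons, this]
      congr 1
      push_cast; ring

theorem pvClumps_cons (v : Int) (xs : List Int) :
    pvClumps (v :: xs) =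
      v * ((pvRunLen v xs : Int) + 1) :: pvClumps (xs.drop (pvRunLen v xs)) := by
  rw [pvClumps]

theorem pvCount_eq_runLen (nums : List Int) :
    ∀ start : Int, pvCount nums start ((nums.length : Int) - 1) =
      pvRunLen (PySem.List.pyGetD nums start 0) (seqFrom nums (start + 1)) := by
  intro start
  by_cases h : start < (nums.length : Int) - 1
  · rw [pvCount, if_pos h, seqFrom_cons nums (start + 1) (by omega)]
    by_cases he : PySem.List.pyGetD nums start 0 = PySem.List.pyGetD nums (start + 1) 0
    · rw [if_pos he, pvRunLen, if_pos he.symm, he]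
      rw [pvCount_eq_runLen nums (start + 1)]
    · rw [if_neg he, pvRunLen, if_neg (fun hx => he hx.symm)]
  · rw [pvCount, if_neg h, seqFrom_nil nums (start + 1) (by omega)]
    rfl
termination_by start => ((nums.length : Int) - 1 - start).toNat
decreasing_by omega

theorem groupSumClump_eq_reachB (nums : List Int) :
    ∀ (start target : Int),
      groupSumClump start nums target = reachB (pvClumps (seqFrom nums start)) target := by
  intro start target
  by_cases h : (nums.length : Int) ≤ start
  · rw [groupSumClump, if_pos h, seqFrom_nil nums start h]
    simp [pvClumps, reachB]
  · rw [groupSumClump, if_neg h, seqFrom_cons nums start (by omega)]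
    rw [pvClumps_cons]
    simp only [pvCount_eq_runLen nums start]
    set v := PySem.List.pyGetD nums start 0 with hv
    set k := pvRunLen v (seqFrom nums (start + 1)) with hk
    have hdrop : (seqFrom nums (start + 1)).drop k = seqFrom nums (start + 1 + k) :=
      seqFrom_drop nums k (start + 1)
    rw [hdrop, reachB]
    by_cases hkpos : k > 0
    · rw [if_pos hkpos]
      rw [groupSumClump_eq_reachB nums (start + ((k : Int) + 1)) (target - v * ((k : Int) + 1))]
      rw [groupSumClump_eq_reachB nums (start + ((k : Int) + 1)) target]
      have harg : start + ((k : Int) + 1) = start + 1 + (k : Int) := by ring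
      rw [harg]
    · rw [if_neg hkpos]
      have hk0 : k = 0 := by omega
      rw [groupSumClump_eq_reachB nums (start + 1) (target - v)]
      rw [groupSumClump_eq_reachB nums (start + 1) target]
      rw [hk0]
      norm_num
termination_by start _ => ((nums.length : Int) - start).toNat
decreasing_by all_goals omega

theorem foldl_contains_eq (gs : List Int) :
    ∀ (r : PySem.Set Int), r.Nodup → ∀ t : Int,
      PySem.Set.contains
        (gs.foldl (fun r g => PySem.Set.union r (r.map (fun s => s + g))) r) t =
      r.any (fun s => reachB gs (t - s)) := by
  induction gs with
  | nil =>
    intro r _ t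
    simp only [List.foldl_nil, reachB]
    rcases hc : PySem.Set.contains r t with _ | _
    · symm; simp only [List.any_eq_false]
      intro s hs hbe
      have h' : t - s = 0 := by simpa using hbe
      have : s = t := by omega
      subst this
      rw [PySem.Set.contains_eq_listContains] at hc
      simp at hc
      exact hc hs
    · symm; simp only [List.any_eq_true]
      refine ⟨t, ?_, by simp⟩
      have := (PySem.Set.contains_iff (s := r) (x := t)).mp hc
      exact this
  | cons g gs ih =>
    intro r hnd t
    simp only [List.foldl_cons]
    rw [ih _ (PySem.Set.nodup_union _ _ hnd) t]
    rcases hl : (PySem.Set.union r (r.map fun s => s + g)).any (fun s => reachB gs (t - s)) with _ | _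
    · symm
      simp only [List.any_eq_false] at hl ⊢
      intro s hs
      have h1 := hl s (by rw [PySem.Set.mem_union]; left; exact hs)
      have h2 := hl (s + g) (by rw [PySem.Set.mem_union]; right; exact List.mem_map.mpr ⟨s, hs, rfl⟩)
      rw [reachB]
      simp only [Bool.or_eq_true] at *
      push_neg
      constructor
      · have : t - s - g = t - (s + g) := by ring
        rw [this]; exact h2
      · exact h1
    · symm
      simp only [List.any_eq_true] at hl ⊢
      obtain ⟨x, hx, hrx⟩ := hl
      rw [PySem.Set.mem_union] at hx
      rcases hx with hx | hx
      · exact ⟨x, hx, by rw [reachB]; simp [hrx]⟩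
      · simp only [List.mem_map] at hx
        obtain ⟨s, hs, rfl⟩ := hx
        refine ⟨s, hs, ?_⟩
        rw [reachB]
        have : t - (s + g) = t - s - g := by ring
        rw [this] at hrx
        simp [hrx]

theorem alt_eq_reachB (start : Int) (nums : List Int) (target : Int) :
    groupSumClump_alt start nums target = reachB (pvClumps (seqFrom nums start)) target := by
  unfold groupSumClump_alt
  by_cases h : (nums.length : Int) ≤ start
  · rw [if_pos h, seqFrom_nil nums start h]
    simp [pvClumps, reachB]
  · rw [if_neg h]
    simp only
    rw [foldl_contains_eq _ _ (PySem.Set.nodup_ofList _) target]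
    have : PySem.Set.ofList [(0 : Int)] = [0] := by decide
    rw [this]
    simp [seqFrom]

-- ===== VERDICT (by name: the statement is the Claim_ definition above) =====
theorem groupSumClump_spec : Claim_equal_groupSumClump := by
  intro start nums target _ _
  unfold Spec_groupSumClump
  rw [groupSumClump_eq_reachB, alt_eq_reachB]
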